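-- pv_equiv track=rewrite | github.com/ssarunic/thestill | thestill/core/transcriber.py | _has_repeated_phrases
-- ===== SOURCE A (Python) =====
-- from typing import Dict, List, Optional, Tuple
--
-- def _has_repeated_phrases(words: List[str], phrase_length: int) -> bool:
--     """Check for repeated phrases of given length"""
--     if len(words) < phrase_length * 3:  # Need at least 3 repetitions
--         return False
--
--     phrase_counts = {}
--     for i in range(len(words) - phrase_length + 1):
--         phrase = ' '.join(words[i:i + phrase_length]).lower()
--         phrase_counts[phrase] = phrase_counts.get(phrase, 0) + 1
--
--     # If any phrase appears more than 3 times, it's likely repetitive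
--     for phrase, count in phrase_counts.items():
--         if count >= 3:
--             return True
--
--     return False
-- ===== SOURCE B (Python) =====
-- from typing import List
--
--
-- def _has_repeated_phrases(words: List[str], phrase_length: int) -> bool:
--     """Check for repeated phrases of given length (sort-then-run-scan)."""
--     if len(words) < phrase_length * 3:  # Need at least 3 repetitions
--         return False
--
--     phrases = [' '.join(words[i:i + phrase_length]).lower()
--                for i in range(len(words) - phrase_length + 1)]
--     phrases.sort()
--
--     run = 1
--     for j in range(1, len(phrases)):
--         if phrases[j] == phrases[j - 1]:
--             run += 1
--             if run >= 3:
--                 return True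
--         else:
--             run = 1
--     return False
-- ===== Notes on version B (the rewrite author's own statement) =====
-- stated objective: alternative
-- what changed: Replaces hash-map counting plus a scan over dict items with building the phrase list once, sorting it, and detecting a run of 3 equal adjacent phrases in one pass.
import Mathlib
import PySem

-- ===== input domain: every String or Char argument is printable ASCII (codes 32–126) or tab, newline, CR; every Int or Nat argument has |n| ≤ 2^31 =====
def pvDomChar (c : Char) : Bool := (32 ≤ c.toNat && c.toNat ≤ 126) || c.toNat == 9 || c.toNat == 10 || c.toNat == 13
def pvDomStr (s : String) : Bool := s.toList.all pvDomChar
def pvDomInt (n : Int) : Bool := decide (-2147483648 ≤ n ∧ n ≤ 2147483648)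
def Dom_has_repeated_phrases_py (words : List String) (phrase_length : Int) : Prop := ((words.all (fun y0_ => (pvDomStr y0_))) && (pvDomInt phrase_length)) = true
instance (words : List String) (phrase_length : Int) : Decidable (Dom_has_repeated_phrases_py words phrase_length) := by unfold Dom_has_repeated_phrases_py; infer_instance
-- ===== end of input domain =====

-- B replaces A's hash-map phrase counting with sort-then-run-scan over the same phrase list; alternative decomposition, similar cost.


-- ===== PORT A =====
def has_repeated_phrases_py (words : List String) (phrase_length : Int) : Bool :=
  if PySem.List.len words < phrase_length * 3 then false
  else
    let phrase_counts : PySem.Dict String Int :=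
      (PySem.List.pyRange 0 (PySem.List.len words - phrase_length + 1) 1).foldl
        (fun d i =>
          let phrase := PySem.Str.lower
            (PySem.Str.join " " (PySem.List.slice words (some i) (some (i + phrase_length))))
          d.insert phrase (d.getD phrase 0 + 1))
        PySem.Dict.empty
    phrase_counts.items.any (fun pc => decide ((3 : Int) ≤ pc.2))

-- ===== PORT B =====
-- the phrase built at index i (same expression as in Source B's comprehension)
def pvPhrase (words : List String) (phrase_length : Int) (i : Int) : String :=
  PySem.Str.lower (PySem.Str.join " " (PySem.List.slice words (some i) (some (i + phrase_length))))

-- Source B's run-length scan of the sorted list: prev = previous phrase, run = current run length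
def pvScanRun (prev : String) (run : Nat) : List String → Bool
  | [] => false
  | x :: xs =>
      if x == prev then
        if run + 1 ≥ 3 then true else pvScanRun x (run + 1) xs
      else pvScanRun x 1 xs

def has_repeated_phrases_py_alt (words : List String) (phrase_length : Int) : Bool :=
  if PySem.List.len words < phrase_length * 3 then false
  else
    let phrases :=
      (PySem.List.pyRange 0 (PySem.List.len words - phrase_length + 1) 1).map
        (pvPhrase words phrase_length)
    match List.mergeSort phrases (fun a b => a ≤ b) with
    | [] => false
    | h :: t => pvScanRun h 1 t

-- ===== PRECONDITION & SPEC =====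
def Spec_has_repeated_phrases_py (words : List String) (phrase_length : Int) (out : Bool) : Prop := out = has_repeated_phrases_py_alt words phrase_length
instance (words : List String) (phrase_length : Int) (out : Bool) : Decidable (Spec_has_repeated_phrases_py words phrase_length out) := by unfold Spec_has_repeated_phrases_py; infer_instance

-- ===== CLAIM (what is proved, stated in full; the proofs are below) =====
def Claim_equal_has_repeated_phrases_py : Prop := ∀ (words : List String) (phrase_length : Int), Dom_has_repeated_phrases_py words phrase_length → Spec_has_repeated_phrases_py words phrase_length (has_repeated_phrases_py words phrase_length)

-- ===== LEMMAS AND PROOFS =====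

-- folding the insert/getD+1 pattern over f-images builds the counter of the mapped list
theorem counter_map {α κ : Type} [BEq κ] (f : α → κ) (l : List α) :
    l.foldl (fun d i => d.insert (f i) (d.getD (f i) 0 + 1)) PySem.Dict.empty
      = PySem.Dict.counter (l.map f) := by
  rw [← PySem.Dict.foldl_insert_getD_add_one_eq_counter, List.foldl_map]

-- A's result is "some phrase occurs ≥ 3 times in the phrase list"
theorem a_iff (words : List String) (phrase_length : Int)
    (h : ¬ PySem.List.len words < phrase_length * 3) :
    (has_repeated_phrases_py words phrase_length = true ↔
      ∃ p ∈ (PySem.List.pyRange 0 (PySem.List.len words - phrase_length + 1) 1).map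
              (pvPhrase words phrase_length),
        3 ≤ ((PySem.List.pyRange 0 (PySem.List.len words - phrase_length + 1) 1).map
              (pvPhrase words phrase_length)).count p) := by
  unfold has_repeated_phrases_py
  rw [if_neg h]
  rw [show (PySem.List.pyRange 0 (PySem.List.len words - phrase_length + 1) 1).foldl
        (fun d i =>
          let phrase := PySem.Str.lower
            (PySem.Str.join " " (PySem.List.slice words (some i) (some (i + phrase_length))))
          d.insert phrase (d.getD phrase 0 + 1))
        PySem.Dict.empty
      = PySem.Dict.counter
          ((PySem.List.pyRange 0 (PySem.List.len words - phrase_length + 1) 1).map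
            (pvPhrase words phrase_length))
    from counter_map (pvPhrase words phrase_length) _]
  simp only [PySem.Dict.items_counter, List.any_eq_true, List.mem_map]
  constructor
  · rintro ⟨pc, ⟨k, hk, rfl⟩, hc⟩
    exact ⟨k, List.mem_map.mp ((PySem.Set.mem_ofList _ _).mp hk), by simpa using hc⟩
  · rintro ⟨p, hp, hc⟩
    exact ⟨(p, _), ⟨p, (PySem.Set.mem_ofList _ _).mpr (List.mem_map.mpr hp), rfl⟩, by simpa using hc⟩

-- run-scan on a sorted tail detects exactly "run closes to 3 or some later phrase has count ≥ 3"
theorem scanRun_iff (xs : List String) : ∀ (prev : String) (run : Nat),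
    1 ≤ run → run ≤ 2 →
    xs.Pairwise (fun a b => a ≤ b) → (∀ y ∈ xs, prev ≤ y) →
    (pvScanRun prev run xs = true ↔
      3 ≤ run + xs.count prev ∨ ∃ p ∈ xs, p ≠ prev ∧ 3 ≤ xs.count p) := by
  induction xs with
  | nil =>
    intro prev run h1 h2 _ _
    simp [pvScanRun]
    omega
  | cons x rest ih =>
    intro prev run h1 h2 hpw hge
    have hx : prev ≤ x := hge x (List.mem_cons_self ..)
    have hrest : ∀ y ∈ rest, x ≤ y := fun y hy => List.rel_of_pairwise_cons hpw hy
    by_cases hxp : x = prev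
    · subst hxp
      by_cases h3 : run + 1 ≥ 3
      · have hscan : pvScanRun x run (x :: rest) = true := by simp [pvScanRun, h3]
        rw [hscan]
        simp only [true_iff]
        left
        have : (x :: rest).count x = rest.count x + 1 := by simp
        omega
      · have hscan : pvScanRun x run (x :: rest) = pvScanRun x (run + 1) rest := by
          simp [pvScanRun, h3]
        rw [hscan, ih x (run + 1) (by omega) (by omega) hpw.of_cons hrest]
        have hcx : (x :: rest).count x = rest.count x + 1 := by simp
        constructor
        · rintro (hc | ⟨p, hp, hpx, hc⟩)
          · left; omega
          · right
            refine ⟨p, List.mem_cons_of_mem _ hp, hpx, ?_⟩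
            simpa [List.count_cons, Ne.symm hpx] using hc
        · rintro (hc | ⟨p, hp, hpx, hc⟩)
          · left; omega
          · right
            rcases List.mem_cons.mp hp with rfl | hp'
            · exact absurd rfl hpx
            · exact ⟨p, hp', hpx, by simpa [List.count_cons, Ne.symm hpx] using hc⟩
    · have hlt : prev < x := lt_of_le_of_ne hx (fun e => hxp e.symm)
      have hnotmem : prev ∉ x :: rest := by
        intro hm
        rcases List.mem_cons.mp hm with rfl | hm'
        · exact hxp rfl
        · exact absurd (hrest prev hm') (not_le.mpr hlt)
      have hscan : pvScanRun prev run (x :: rest) = pvScanRun x 1 rest := by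
        simp [pvScanRun, beq_iff_eq, hxp]
      rw [hscan, ih x 1 (le_refl 1) (by omega) hpw.of_cons hrest]
      have hcz : (x :: rest).count prev = 0 := List.count_eq_zero.mpr hnotmem
      have hgt : ∀ p ∈ x :: rest, p ≠ prev := by
        intro p hp e; exact hnotmem (e ▸ hp)
      constructor
      · rintro (hc | ⟨p, hp, hpx, hc⟩)
        · right
          refine ⟨x, List.mem_cons_self .., hgt x (List.mem_cons_self ..), ?_⟩
          simp
          omega
        · right
          refine ⟨p, List.mem_cons_of_mem _ hp, hgt p (List.mem_cons_of_mem _ hp), ?_⟩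
          simpa [List.count_cons, Ne.symm hpx] using hc
      · rintro (hc | ⟨p, hp, _, hc⟩)
        · omega
        · rcases List.mem_cons.mp hp with rfl | hp'
          · left
            have : (p :: rest).count p = rest.count p + 1 := by simp
            omega
          · by_cases hpx : p = x
            · subst hpx
              left
              have : (p :: rest).count p = rest.count p + 1 := by simp
              omega
            · right
              exact ⟨p, hp', hpx, by simpa [List.count_cons, Ne.symm hpx] using hc⟩

-- B's result is the same statement about the sorted list
theorem b_iff (l : List String) :
    ((match List.mergeSort l (fun a b => a ≤ b) with
      | [] => false
      | h :: t => pvScanRun h 1 t) = true ↔ ∃ p ∈ l, 3 ≤ l.count p) := by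
  have hperm := List.mergeSort_perm l (fun a b : String => decide (a ≤ b))
  have hpw := List.pairwise_mergeSort
    (le := fun a b : String => decide (a ≤ b))
    (fun a b c hab hbc => by
      simp only [decide_eq_true_eq] at *; exact le_trans hab hbc)
    (fun a b => by
      simp only [Bool.or_eq_true, decide_eq_true_eq]; exact le_total a b)
    l
  simp only [decide_eq_true_eq] at hpw
  cases hs : List.mergeSort l (fun a b : String => decide (a ≤ b)) with
  | nil =>
    have : l = [] := (hs ▸ hperm).symm.eq_nil
    subst this
    simp
  | cons h t =>
    rw [hs] at hperm hpw
    have hhead : ∀ y ∈ t, h ≤ y := fun y hy => List.rel_of_pairwise_cons hpw hy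
    rw [scanRun_iff t h 1 (le_refl 1) (by omega) hpw.of_cons hhead]
    have step : (3 ≤ 1 + t.count h ∨ ∃ p ∈ t, p ≠ h ∧ 3 ≤ t.count p) ↔
        ∃ p ∈ h :: t, 3 ≤ (h :: t).count p := by
      constructor
      · rintro (hc | ⟨p, hp, hpx, hc⟩)
        · refine ⟨h, List.mem_cons_self .., ?_⟩
          have : (h :: t).count h = t.count h + 1 := by simp
          omega
        · exact ⟨p, List.mem_cons_of_mem _ hp, by simpa [List.count_cons, Ne.symm hpx] using hc⟩
      · rintro ⟨p, hp, hc⟩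
        rcases List.mem_cons.mp hp with rfl | hp'
        · left
          have : (p :: t).count p = t.count p + 1 := by simp
          omega
        · by_cases hpx : p = h
          · subst hpx
            left
            have : (p :: t).count p = t.count p + 1 := by simp
            omega
          · right
            exact ⟨p, hp', hpx, by simpa [List.count_cons, Ne.symm hpx] using hc⟩
    rw [step]
    constructor
    · rintro ⟨p, hp, hc⟩
      exact ⟨p, hperm.mem_iff.mp hp, by rwa [hperm.count_eq] at hc⟩
    · rintro ⟨p, hp, hc⟩
      exact ⟨p, hperm.mem_iff.mpr hp, by rwa [hperm.count_eq]⟩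

-- ===== VERDICT (by name: the statement is the Claim_ definition above) =====
theorem has_repeated_phrases_py_spec : Claim_equal_has_repeated_phrases_py := by
  intro words phrase_length _
  unfold Spec_has_repeated_phrases_py
  by_cases h : PySem.List.len words < phrase_length * 3
  · unfold has_repeated_phrases_py has_repeated_phrases_py_alt
    rw [if_pos h, if_pos h]
  · rw [Bool.eq_iff_iff, a_iff words phrase_length h]
    unfold has_repeated_phrases_py_alt
    rw [if_neg h]
    exact (b_iff _).symm
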